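-- pv_equiv track=rewrite | github.com/junhyeong7788/Python-Problem-Solving | 프로그래머스/0/181926. 수 조작하기 1/수 조작하기 1.py | solution
-- ===== SOURCE A (Python) =====
-- def solution(n, control):
--     for x in control:
--         if x == "w":
--             n += 1
--         elif x == "a":
--             n -= 10
--         elif x == "s":
--             n -= 1
--         else:
--             n += 10
--     return n
-- ===== SOURCE B (Python) =====
-- def solution(n, control):
--     cs = list(control)
--     w = cs.count('w')
--     a = cs.count('a')
--     s = cs.count('s')
--     return n + w - s - 10 * a + 10 * (len(control) - w - a - s)
-- ===== Notes on version B (the rewrite author's own statement) =====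
-- stated objective: simpler
-- what changed: Replaces the accumulating per-character branch loop with three count() calls and one closed arithmetic formula (every non-w/a/s character contributes +10).
import Mathlib
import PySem

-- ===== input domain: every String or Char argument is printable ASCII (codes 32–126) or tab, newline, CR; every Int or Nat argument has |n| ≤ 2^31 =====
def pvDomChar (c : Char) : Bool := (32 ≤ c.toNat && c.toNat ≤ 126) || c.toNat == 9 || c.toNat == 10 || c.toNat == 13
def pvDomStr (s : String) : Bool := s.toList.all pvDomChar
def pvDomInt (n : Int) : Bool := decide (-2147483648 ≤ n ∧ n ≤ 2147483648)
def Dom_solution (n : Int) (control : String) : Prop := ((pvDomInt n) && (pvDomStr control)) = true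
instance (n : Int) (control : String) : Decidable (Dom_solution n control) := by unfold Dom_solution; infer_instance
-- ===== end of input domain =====

-- B replaces A's per-character accumulating branch loop with three list counts and one closed arithmetic formula (simpler).


-- ===== PORT A =====
def solution (n : Int) (control : String) : Int :=
  control.toList.foldl
    (fun n x =>
      if x == 'w' then n + 1
      else if x == 'a' then n - 10
      else if x == 's' then n - 1
      else n + 10) n

-- ===== PORT B =====
def solution_alt (n : Int) (control : String) : Int :=
  let cs := control.toList
  let w : Int := PySem.List.count cs 'w'
  let a : Int := PySem.List.count cs 'a'
  let s : Int := PySem.List.count cs 's'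
  n + w - s - 10 * a + 10 * ((PySem.Str.len control : Int) - w - a - s)

-- ===== PRECONDITION & SPEC =====
def Spec_solution (n : Int) (control : String) (out : Int) : Prop := out = solution_alt n control
instance (n : Int) (control : String) (out : Int) : Decidable (Spec_solution n control out) := by unfold Spec_solution; infer_instance

-- ===== CLAIM (what is proved, stated in full; the proofs are below) =====
def Claim_equal_solution : Prop := ∀ (n : Int) (control : String), Dom_solution n control → Spec_solution n control (solution n control)

-- ===== LEMMAS AND PROOFS =====

theorem solution_foldl (cs : List Char) (n : Int) :
    cs.foldl
      (fun n x =>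
        if x == 'w' then n + 1
        else if x == 'a' then n - 10
        else if x == 's' then n - 1
        else n + 10) n
    = n + (cs.count 'w' : Int) - (cs.count 's' : Int) - 10 * (cs.count 'a' : Int)
        + 10 * ((cs.length : Int) - (cs.count 'w' : Int) - (cs.count 'a' : Int) - (cs.count 's' : Int)) := by
  induction cs generalizing n with
  | nil => simp
  | cons x xs ih =>
    simp only [List.foldl_cons, List.count_cons, List.length_cons, ih]
    by_cases hw : x = 'w' <;> by_cases ha : x = 'a' <;> by_cases hs : x = 's' <;>
      simp_all <;> ring

-- ===== VERDICT (by name: the statement is the Claim_ definition above) =====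
theorem solution_spec : Claim_equal_solution := by
  intro n control _
  unfold Spec_solution solution solution_alt
  simp only [PySem.List.count_eq, PySem.Str.len_eq, solution_foldl]
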